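-- pv_equiv track=rewrite | github.com/coreyt/one-0-one | tests/test_battleship_live_e2e.py | _sunk_from_history
-- ===== SOURCE A (Python) =====
-- def _sunk_from_history(
--     attack_history: dict[str, str],
--     target_positions: dict[str, list[str]],
-- ) -> list[str]:
--     """Derive which ships are sunk from attack history and actual ship positions."""
--     hit_coords = {c for c, r in attack_history.items() if r == "hit"}
--     return [
--         ship
--         for ship, cells in target_positions.items()
--         if set(cells).issubset(hit_coords)
--     ]
-- ===== SOURCE B (Python) =====
-- def _sunk_from_history(
--     attack_history: dict[str, str],
--     target_positions: dict[str, list[str]],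
-- ) -> list[str]:
--     """Derive which ships are sunk from attack history and actual ship positions."""
--     remaining = {ship: set(cells) for ship, cells in target_positions.items()}
--     for cell, result in attack_history.items():
--         if result == "hit":
--             for cells in remaining.values():
--                 cells.discard(cell)
--     return [ship for ship, cells in remaining.items() if not cells]
-- ===== Notes on version B (the rewrite author's own statement) =====
-- stated objective: alternative
-- what changed: B inverts the traversal: instead of building a hit-coordinate index and testing each ship's cells for subset inclusion, it initialises per-ship sets of not-yet-hit cells and drives a single scan over the attack history that deletes each hit cell from every ship's remaining set, finally reporting ships whose remaining set is empty.
import Mathlib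
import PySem

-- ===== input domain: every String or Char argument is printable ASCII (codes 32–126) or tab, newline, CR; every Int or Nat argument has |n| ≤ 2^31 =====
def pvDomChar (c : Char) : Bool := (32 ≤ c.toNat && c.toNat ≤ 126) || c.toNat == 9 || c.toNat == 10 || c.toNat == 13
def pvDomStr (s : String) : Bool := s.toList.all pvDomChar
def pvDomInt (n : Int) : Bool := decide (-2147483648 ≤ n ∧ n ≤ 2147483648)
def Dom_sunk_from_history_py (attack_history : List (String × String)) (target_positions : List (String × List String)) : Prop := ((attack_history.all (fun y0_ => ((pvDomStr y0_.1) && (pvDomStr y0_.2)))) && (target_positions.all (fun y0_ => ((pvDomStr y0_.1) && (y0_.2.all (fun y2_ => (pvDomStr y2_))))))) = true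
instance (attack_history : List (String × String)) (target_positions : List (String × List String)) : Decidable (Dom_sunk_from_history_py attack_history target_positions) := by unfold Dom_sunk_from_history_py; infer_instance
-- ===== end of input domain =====

-- B inverts the traversal: per-ship remaining-cell sets, one scan of the attack history deleting
-- hit cells, ships with empty remaining set are sunk (objective: alternative; not faster).


-- ===== PORT A =====
-- hit_coords = {c for c, r in attack_history.items() if r == "hit"}; then
-- [ship for ship, cells in target_positions.items() if set(cells).issubset(hit_coords)]
def sunk_from_history_py (attack_history : List (String × String)) (target_positions : List (String × List String)) : List String :=
  let hit_coords : PySem.Set String :=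
    attack_history.foldl (fun s p => if p.2 == "hit" then PySem.Set.add s p.1 else s) PySem.Set.empty
  (target_positions.filter
      (fun p => PySem.Set.issubset (PySem.Set.ofList p.2) hit_coords)).map Prod.fst

-- ===== PORT B =====
-- remaining = {ship: set(cells) for ship, cells in target_positions.items()}
-- for cell, result in attack_history.items():
--     if result == "hit":
--         for cells in remaining.values(): cells.discard(cell)
-- [ship for ship, cells in remaining.items() if not cells]
def sunk_from_history_py_alt (attack_history : List (String × String)) (target_positions : List (String × List String)) : List String :=
  let remaining : List (String × PySem.Set String) :=
    target_positions.map (fun p => (p.1, PySem.Set.ofList p.2))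
  let remaining :=
    attack_history.foldl
      (fun r q => if q.2 == "hit" then r.map (fun e => (e.1, PySem.Set.discard e.2 q.1)) else r)
      remaining
  (remaining.filter (fun e => e.2.isEmpty)).map Prod.fst

-- ===== PRECONDITION & SPEC =====
def Spec_sunk_from_history_py (attack_history : List (String × String)) (target_positions : List (String × List String)) (out : List String) : Prop := out = sunk_from_history_py_alt attack_history target_positions
instance (attack_history : List (String × String)) (target_positions : List (String × List String)) (out : List String) : Decidable (Spec_sunk_from_history_py attack_history target_positions out) := by unfold Spec_sunk_from_history_py; infer_instance

-- ===== CLAIM (what is proved, stated in full; the proofs are below) =====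
def Claim_equal_sunk_from_history_py : Prop := ∀ (attack_history : List (String × String)) (target_positions : List (String × List String)), Dom_sunk_from_history_py attack_history target_positions → Spec_sunk_from_history_py attack_history target_positions (sunk_from_history_py attack_history target_positions)

-- ===== LEMMAS AND PROOFS =====

-- membership in A's hit_coords fold
theorem mem_hit_fold (h : List (String × String)) (s : PySem.Set String) (hs : s.Nodup) (c : String) :
    c ∈ h.foldl (fun s p => if p.2 == "hit" then PySem.Set.add s p.1 else s) s ↔
      c ∈ s ∨ (c, "hit") ∈ h := by
  induction h generalizing s with
  | nil => simp
  | cons q t ih =>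
    simp only [List.foldl_cons]
    by_cases hq : q.2 = "hit"
    · rw [if_pos (by simp [hq]), ih _ (PySem.Set.nodup_add s q.1 hs)]
      simp [PySem.Set.mem_add]
      constructor
      · rintro (⟨h1 | h1⟩ | h1)
        · exact Or.inl h1
        · exact Or.inr (Or.inl (by cases q; simp_all))
        · exact Or.inr (Or.inr h1)
      · rintro (h1 | h1 | h1)
        · exact Or.inl (Or.inl h1)
        · exact Or.inl (Or.inr (by cases q; simp_all))
        · exact Or.inr h1
    · rw [if_neg (by simpa using hq), ih _ hs]
      constructor
      · rintro (h1 | h1)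
        · exact Or.inl h1
        · exact Or.inr (List.mem_cons_of_mem _ h1)
      · rintro (h1 | h1)
        · exact Or.inl h1
        · rcases List.mem_cons.mp h1 with h2 | h2
          · exact absurd (congrArg Prod.snd h2.symm) hq
          · exact Or.inr h2

-- B's history fold over the whole association list acts per ship
theorem fold_map_discard (h : List (String × String)) (r : List (String × PySem.Set String)) :
    h.foldl
        (fun r q => if q.2 == "hit" then r.map (fun e => (e.1, PySem.Set.discard e.2 q.1)) else r)
        r =
      r.map (fun e =>
        (e.1, h.foldl (fun s q => if q.2 == "hit" then PySem.Set.discard s q.1 else s) e.2)) := by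
  induction h generalizing r with
  | nil => simp
  | cons q t ih =>
    simp only [List.foldl_cons]
    by_cases hq : q.2 == "hit"
    · rw [if_pos hq, ih, List.map_map]
      apply List.map_congr_left
      intro e _
      simp [hq]
    · rw [if_neg (by simpa using hq), ih]
      apply List.map_congr_left
      intro e _
      simp [hq]

-- membership in the per-ship discard fold
theorem mem_discard_fold (h : List (String × String)) (s : PySem.Set String) (c : String) :
    c ∈ h.foldl (fun s q => if q.2 == "hit" then PySem.Set.discard s q.1 else s) s ↔
      c ∈ s ∧ (c, "hit") ∉ h := by
  induction h generalizing s with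
  | nil => simp
  | cons q t ih =>
    simp only [List.foldl_cons]
    by_cases hq : q.2 = "hit"
    · rw [if_pos (by simp [hq]), ih]
      rw [PySem.Set.mem_discard]
      constructor
      · rintro ⟨⟨h1, h2⟩, h3⟩
        refine ⟨h1, ?_⟩
        intro hmem
        rcases List.mem_cons.mp hmem with h4 | h4
        · exact h2 (congrArg Prod.fst h4)
        · exact h3 h4
      · rintro ⟨h1, h2⟩
        refine ⟨⟨h1, fun hc => h2 (by cases q; simp_all)⟩, fun hc => h2 (List.mem_cons_of_mem _ hc)⟩
    · rw [if_neg (by simpa using hq), ih]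
      constructor
      · rintro ⟨h1, h2⟩
        exact ⟨h1, fun hc => (List.mem_cons.mp hc).elim
          (fun h4 => hq (congrArg Prod.snd h4.symm)) h2⟩
      · rintro ⟨h1, h2⟩
        exact ⟨h1, fun hc => h2 (List.mem_cons_of_mem _ hc)⟩

-- ===== VERDICT (by name: the statement is the Claim_ definition above) =====
theorem sunk_from_history_py_spec : Claim_equal_sunk_from_history_py := by
  intro h t _
  unfold Spec_sunk_from_history_py sunk_from_history_py sunk_from_history_py_alt
  simp only []
  rw [fold_map_discard, List.map_map, List.filter_map, List.map_map]
  congr 1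
  apply List.filter_congr
  intro p _
  rw [Bool.eq_iff_iff, PySem.Set.issubset_iff]
  simp only [Function.comp]
  rw [List.isEmpty_iff, List.eq_nil_iff_forall_not_mem]
  constructor
  · intro hsub c hc
    rw [mem_discard_fold] at hc
    rcases hc with ⟨hcs, hnot⟩
    have := hsub c hcs
    rw [mem_hit_fold h PySem.Set.empty List.nodup_nil] at this
    rcases this with h1 | h1
    · simp at h1
    · exact hnot h1
  · intro hall c hc
    rw [mem_hit_fold h PySem.Set.empty List.nodup_nil]
    by_contra hnot
    push Not at hnot
    rcases hnot with ⟨hnot1, hnot2⟩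
    exact hall c (by rw [mem_discard_fold]; exact ⟨hc, hnot2⟩)
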